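-- pv_equiv track=rewrite | github.com/fwmeng88/check-python-versions | src/check_python_versions/cli.py | update_classifiers
-- ===== SOURCE A (Python) =====
-- def is_version_classifier(s):
--     prefix = 'Programming Language :: Python :: '
--     return s.startswith(prefix) and s[len(prefix):len(prefix) + 1].isdigit()
--
-- def is_major_version_classifier(s):
--     prefix = 'Programming Language :: Python :: '
--     return (
--         s.startswith(prefix)
--         and s[len(prefix):].replace(' :: Only', '').isdigit()
--     )
--
-- def update_classifiers(classifiers, new_versions):
--     prefix = 'Programming Language :: Python :: '
--
--     for pos, s in enumerate(classifiers):
--         if is_version_classifier(s):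
--             break
--     else:
--         pos = len(classifiers)
--
--     if any(map(is_major_version_classifier, classifiers)):
--         new_versions = sorted(
--             set(new_versions).union(
--                 v.partition('.')[0] for v in new_versions
--             )
--         )
--
--     classifiers = [
--         s for s in classifiers if not is_version_classifier(s)
--     ]
--     new_classifiers = [
--         f'{prefix}{version}'
--         for version in new_versions
--     ]
--     classifiers[pos:pos] = new_classifiers
--     return classifiers
-- ===== SOURCE B (Python) =====
-- def is_version_classifier(s):
--     prefix = 'Programming Language :: Python :: '
--     return s.startswith(prefix) and s[len(prefix):len(prefix) + 1].isdigit()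
--
-- def is_major_version_classifier(s):
--     prefix = 'Programming Language :: Python :: '
--     return (
--         s.startswith(prefix)
--         and s[len(prefix):].replace(' :: Only', '').isdigit()
--     )
--
-- def update_classifiers(classifiers, new_versions):
--     prefix = 'Programming Language :: Python :: '
--     # single pass: filter, find the insertion point, and detect major classifiers at once
--     kept = []
--     insertion_index = None
--     major = False
--     for s in classifiers:
--         if is_version_classifier(s):
--             if insertion_index is None:
--                 insertion_index = len(kept)
--         else:
--             kept.append(s)
--         if is_major_version_classifier(s):
--             major = True
--     if insertion_index is None:
--         insertion_index = len(kept)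
--     if major:
--         new_versions = sorted(
--             set(new_versions).union(
--                 v.partition('.')[0] for v in new_versions
--             )
--         )
--     new_classifiers = [f'{prefix}{v}' for v in new_versions]
--     return kept[:insertion_index] + new_classifiers + kept[insertion_index:]
-- ===== Notes on version B (the rewrite author's own statement) =====
-- stated objective: simpler
-- what changed: A's three separate scans of classifiers (a for/else to find the insertion position, an any(map) major-version check, and a filter comprehension, followed by slice assignment) are fused into one loop that builds the kept list, records the insertion index as len(kept) at the first version classifier, and sets the major flag, then concatenates the result.
import Mathlib
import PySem

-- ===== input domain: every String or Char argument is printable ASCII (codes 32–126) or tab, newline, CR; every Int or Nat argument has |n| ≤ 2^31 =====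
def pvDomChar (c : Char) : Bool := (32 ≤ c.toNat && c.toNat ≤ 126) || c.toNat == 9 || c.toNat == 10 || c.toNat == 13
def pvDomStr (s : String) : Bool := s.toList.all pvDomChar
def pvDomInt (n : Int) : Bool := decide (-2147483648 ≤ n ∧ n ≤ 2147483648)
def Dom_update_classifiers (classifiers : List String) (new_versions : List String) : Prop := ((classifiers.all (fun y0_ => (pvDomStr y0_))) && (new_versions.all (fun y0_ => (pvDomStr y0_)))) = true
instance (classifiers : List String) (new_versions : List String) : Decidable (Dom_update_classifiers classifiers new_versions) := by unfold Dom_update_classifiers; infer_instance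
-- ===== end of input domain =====

-- B fuses A's three scans (for/else position search, any(map) major check, filter comprehension)
-- into one loop over classifiers; objective: simpler (single pass), same asymptotic cost.

-- shared module helpers (both Python versions use them verbatim)
def pvPfx : List Char := "Programming Language :: Python :: ".toList

def is_version_classifier (s : String) : Bool :=
  PySem.Chars.startswith s.toList pvPfx &&
    PySem.Chars.strIsdigit
      (PySem.List.slice s.toList (some (pvPfx.length : Int)) (some ((pvPfx.length : Int) + 1)))

def is_major_version_classifier (s : String) : Bool :=
  PySem.Chars.startswith s.toList pvPfx &&
    PySem.Chars.strIsdigit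
      (PySem.Chars.replace (PySem.List.slice s.toList (some (pvPfx.length : Int)) none)
        " :: Only".toList "".toList)

-- v.partition('.')[0]: the separator is a single character, so this is exactly the
-- characters before the first '.' (whole string if '.' is absent) — hand port, exact.
def partitionDotHead (v : String) : String := String.ofList (v.toList.takeWhile (fun c => c ≠ '.'))

-- ===== PORT A =====
-- the for/else loop over enumerate(classifiers): first index with a version classifier, else len
def findVersionPos : List String → Nat → Nat
  | [], n => n
  | s :: rest, n => if is_version_classifier s then n else findVersionPos rest (n + 1)

def update_classifiers (classifiers : List String) (new_versions : List String) : List String :=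
  let pos := findVersionPos classifiers 0
  let nv :=
    if classifiers.any is_major_version_classifier then
      PySem.List.sorted
        (PySem.Set.union (PySem.Set.ofList new_versions) (new_versions.map partitionDotHead))
        (fun x => x) false
    else new_versions
  let kept := classifiers.filter (fun s => !is_version_classifier s)
  let newcls := nv.map (fun v => String.ofList (pvPfx ++ v.toList))
  -- kept[pos:pos] = newcls
  kept.take pos ++ newcls ++ kept.drop pos

-- ===== PORT B =====
-- one pass: kept list, first insertion index (None until the first version classifier), major flag
def scanB : List String → List String → Option Nat → Bool → List String × Option Nat × Bool
  | [], kept, idx, major => (kept, idx, major)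
  | s :: rest, kept, idx, major =>
    let st :=
      if is_version_classifier s then
        (kept, match idx with | none => some kept.length | some i => some i)
      else (kept ++ [s], idx)
    scanB rest st.1 st.2 (major || is_major_version_classifier s)

def update_classifiers_alt (classifiers : List String) (new_versions : List String) : List String :=
  let st := scanB classifiers [] none false
  let kept := st.1
  let ins := st.2.1.getD kept.length
  let nv :=
    if st.2.2 then
      PySem.List.sorted
        (PySem.Set.union (PySem.Set.ofList new_versions) (new_versions.map partitionDotHead))
        (fun x => x) false
    else new_versions
  let newcls := nv.map (fun v => String.ofList (pvPfx ++ v.toList))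
  kept.take ins ++ newcls ++ kept.drop ins

-- ===== PRECONDITION & SPEC =====
def Spec_update_classifiers (classifiers : List String) (new_versions : List String) (out : List String) : Prop := out = update_classifiers_alt classifiers new_versions
instance (classifiers : List String) (new_versions : List String) (out : List String) : Decidable (Spec_update_classifiers classifiers new_versions out) := by unfold Spec_update_classifiers; infer_instance

-- ===== CLAIM (what is proved, stated in full; the proofs are below) =====
def Claim_equal_update_classifiers : Prop := ∀ (classifiers : List String) (new_versions : List String), Dom_update_classifiers classifiers new_versions → Spec_update_classifiers classifiers new_versions (update_classifiers classifiers new_versions)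

-- ===== LEMMAS AND PROOFS =====

-- index of the first version classifier, counted from n; none if there is none
def firstVer? : List String → Nat → Option Nat
  | [], _ => none
  | s :: rest, n => if is_version_classifier s then some n else firstVer? rest (n + 1)

theorem findVersionPos_eq (l : List String) (n : Nat) :
    findVersionPos l n = (firstVer? l n).getD (n + l.length) := by
  induction l generalizing n with
  | nil => simp [findVersionPos, firstVer?]
  | cons s rest ih =>
    simp only [findVersionPos, firstVer?]
    split
    · rfl
    · simp only [List.length_cons]
      rw [ih]
      congr 1
      omega

theorem scanB_some (l : List String) (kept : List String) (i : Nat) (major : Bool) :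
    scanB l kept (some i) major =
      (kept ++ l.filter (fun s => !is_version_classifier s), some i,
        major || l.any is_major_version_classifier) := by
  induction l generalizing kept major with
  | nil => simp [scanB]
  | cons s rest ih =>
    simp only [scanB, List.filter_cons, List.any_cons]
    by_cases h : is_version_classifier s = true
    · simp [h, ih, Bool.or_assoc]
    · simp only [Bool.not_eq_true] at h
      simp [h, ih, Bool.or_assoc]

theorem scanB_none (l : List String) (kept : List String) (major : Bool) :
    scanB l kept none major =
      (kept ++ l.filter (fun s => !is_version_classifier s), firstVer? l kept.length,
        major || l.any is_major_version_classifier) := by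
  induction l generalizing kept major with
  | nil => simp [scanB, firstVer?]
  | cons s rest ih =>
    simp only [scanB, List.filter_cons, List.any_cons, firstVer?]
    by_cases h : is_version_classifier s = true
    · simp [h, scanB_some, Bool.or_assoc]
    · simp only [Bool.not_eq_true] at h
      simp only [h, Bool.false_eq_true, if_false, Bool.not_false, if_true]
      rw [ih]
      simp [Bool.or_assoc]

-- ===== VERDICT (by name: the statement is the Claim_ definition above) =====
theorem update_classifiers_spec : Claim_equal_update_classifiers := by
  intro classifiers new_versions _
  unfold Spec_update_classifiers update_classifiers update_classifiers_alt
  rw [scanB_none, findVersionPos_eq]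
  simp only [List.length_nil, Bool.false_or, Nat.zero_add]
  cases h : firstVer? classifiers 0 with
  | none =>
    simp only [Option.getD_none]
    have hlen : (classifiers.filter (fun s => !is_version_classifier s)).length ≤ classifiers.length :=
      List.length_filter_le _ _
    rw [List.take_of_length_le hlen, List.take_length,
        List.drop_of_length_le hlen, List.drop_length]
    simp
  | some i => rfl
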